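-- pv_equiv track=rewrite | github.com/Myukies/University | TOC/Practical-8_generating_derivation_sequence.py | generate_language
-- ===== SOURCE A (Python) =====
-- def generate_language(productions, start_symbol):
--     language = []
--
--     def derive(sequence, index):
--         if index == len(sequence):
--             language.append(''.join(sequence))
--             return
--         for production in productions.get(sequence[index], []):
--             new_sequence = sequence[:index] + list(production) + sequence[index + 1:]
--             derive(new_sequence, index + len(production))
--
--     derive([start_symbol], 0)
--     return language
--
-- productions = {
--     'S': ['aA', 'bB'],
--     'A': ['c'],
--     'B': ['d']
-- }
--
-- start_symbol = 'S'
-- ===== SOURCE B (Python) =====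
-- def generate_language(productions, start_symbol):
--     # A's index jump (index += len(production)) means derive only ever performs a
--     # single one-level expansion of start_symbol, so the language is exactly the
--     # list of production strings for start_symbol (empty if the symbol is absent).
--     return list(productions.get(start_symbol, []))
-- ===== Notes on version B (the rewrite author's own statement) =====
-- stated objective: simpler
-- what changed: A's recursive derive() with index += len(production) always jumps past the substituted symbols, so it collapses to one level of expansion; B replaces the recursion with a single dictionary lookup returning the production list of start_symbol.
import Mathlib
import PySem

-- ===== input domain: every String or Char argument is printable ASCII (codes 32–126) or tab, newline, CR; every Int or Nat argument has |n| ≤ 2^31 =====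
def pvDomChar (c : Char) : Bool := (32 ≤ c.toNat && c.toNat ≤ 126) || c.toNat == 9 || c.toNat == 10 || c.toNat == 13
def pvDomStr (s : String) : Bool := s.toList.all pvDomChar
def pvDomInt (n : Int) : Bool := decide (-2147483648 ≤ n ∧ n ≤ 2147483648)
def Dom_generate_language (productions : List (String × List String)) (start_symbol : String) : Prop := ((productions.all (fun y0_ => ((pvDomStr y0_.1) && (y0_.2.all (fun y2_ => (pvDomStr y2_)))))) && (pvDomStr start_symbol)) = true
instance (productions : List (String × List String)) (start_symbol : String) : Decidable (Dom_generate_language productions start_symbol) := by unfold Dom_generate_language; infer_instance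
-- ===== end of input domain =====

-- Header: B replaces A's recursive one-level derive() with a direct lookup of
-- start_symbol's production list; objective: simpler.

-- ===== PORT A =====
-- derive(sequence, index): each nested Python call strictly decreases
-- sequence.length - index, so that quantity (passed as 'gas', 1 at the entry
-- call derive([start_symbol], 0)) makes the recursion structural; the gas = 0
-- fallthrough (and the final 'else language') correspond to index exceeding
-- the bounds, where Python's sequence[index] would raise IndexError — both are
-- unreachable from the entry call, which preserves gas = sequence.length - index.
def pvDerive (productions : PySem.Dict String (List String)) (gas : Nat) (sequence : List String) (index : Nat) (language : List String) : List String :=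
  if index = sequence.length then
    language ++ [PySem.Str.join "" sequence]              -- language.append(''.join(sequence))
  else
    match gas with
    | 0 => language
    | g + 1 =>
      if index < sequence.length then
        -- for production in productions.get(sequence[index], []):
        (productions.getD (sequence.getD index "") []).foldl
          (fun acc production =>
            -- new_sequence = sequence[:index] + list(production) + sequence[index+1:]
            pvDerive productions g
              (sequence.take index ++ production.toList.map (fun c => String.ofList [c]) ++ sequence.drop (index + 1))
              (index + production.toList.length) acc)
          language
      else
        language

def generate_language (productions : List (String × List String)) (start_symbol : String) : List String :=
  pvDerive (PySem.Dict.ofList productions) 1 [start_symbol] 0 []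

-- ===== PORT B =====
def generate_language_alt (productions : List (String × List String)) (start_symbol : String) : List String :=
  (PySem.Dict.ofList productions).getD start_symbol []

-- ===== PRECONDITION & SPEC =====
def Spec_generate_language (productions : List (String × List String)) (start_symbol : String) (out : List String) : Prop := out = generate_language_alt productions start_symbol
instance (productions : List (String × List String)) (start_symbol : String) (out : List String) : Decidable (Spec_generate_language productions start_symbol out) := by unfold Spec_generate_language; infer_instance

-- ===== CLAIM (what is proved, stated in full; the proofs are below) =====
def Claim_equal_generate_language : Prop := ∀ (productions : List (String × List String)) (start_symbol : String), Dom_generate_language productions start_symbol → Spec_generate_language productions start_symbol (generate_language productions start_symbol)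

-- ===== LEMMAS AND PROOFS =====

-- ''.join of the one-character strings of p is p itself
theorem pv_join_singletons (p : String) :
    PySem.Str.join "" (p.toList.map (fun c => String.ofList [c])) = p := by
  have hc : (String.toList ∘ fun c : Char => String.ofList [c]) = fun c => [c] := by
    funext c; simp
  have h : (PySem.Str.join "" (p.toList.map (fun c => String.ofList [c]))).toList = p.toList := by
    simp only [PySem.Str.toList_join, List.map_map, hc]
    simp [PySem.Chars.join_nil_singletons]
  exact String.toList_inj.mp h

-- one step of the inner loop on a length-1 sequence appends the production itself
theorem pv_derive_step (d : PySem.Dict String (List String)) (p : String) (lang : List String) :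
    pvDerive d 0 (p.toList.map (fun c => String.ofList [c])) p.length lang = lang ++ [p] := by
  rw [pvDerive]
  simp [pv_join_singletons]

-- the loop over the productions of start_symbol appends each production in order
theorem pv_loop_append (d : PySem.Dict String (List String)) (L lang : List String) :
    L.foldl (fun acc p => pvDerive d 0 (p.toList.map (fun c => String.ofList [c])) p.length acc) lang = lang ++ L := by
  induction L generalizing lang with
  | nil => simp
  | cons p rest ih =>
    rw [List.foldl_cons, pv_derive_step, ih]
    simp

-- ===== VERDICT (by name: the statement is the Claim_ definition above) =====
theorem generate_language_spec : Claim_equal_generate_language := by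
  intro productions start_symbol _
  unfold Spec_generate_language generate_language generate_language_alt
  rw [pvDerive]
  simp only [List.length_cons, List.length_nil, Nat.zero_add]
  rw [if_neg (by omega), if_pos (by omega)]
  simp only [List.getD_cons_zero, List.take_zero, List.drop_succ_cons, List.drop_nil,
    List.nil_append, List.append_nil]
  have := pv_loop_append (PySem.Dict.ofList productions)
    ((PySem.Dict.ofList productions).getD start_symbol []) []
  simpa using this
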